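-- pv_equiv track=rewrite | github.com/LouCHANCRIN/expert_system | evaluate.py | index_parenthese
-- ===== SOURCE A (Python) =====
-- def index_parenthese(expression):
--     a = 0
--     b = 0
--     for i in range(0, len(expression)):
--         if expression[i] == ')':
--             b = i
--             break
--     for i in range(b, 0, -1):
--         if expression[i] == '(':
--             a = i
--             break
--     return a, b + 1
-- ===== SOURCE B (Python) =====
-- def index_parenthese(expression):
--     last_open = 0
--     for i, ch in enumerate(expression):
--         if ch == ')':
--             return last_open, i + 1
--         if ch == '(':
--             last_open = i
--     return 0, 1
-- ===== Notes on version B (the rewrite author's own statement) =====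
-- stated objective: simpler
-- what changed: Replaces A's two passes (a forward scan for the first close paren then a backward scan from it for the nearest open paren) with a single forward pass that records the most recent open-paren index and returns immediately at the first close paren.
import Mathlib
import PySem

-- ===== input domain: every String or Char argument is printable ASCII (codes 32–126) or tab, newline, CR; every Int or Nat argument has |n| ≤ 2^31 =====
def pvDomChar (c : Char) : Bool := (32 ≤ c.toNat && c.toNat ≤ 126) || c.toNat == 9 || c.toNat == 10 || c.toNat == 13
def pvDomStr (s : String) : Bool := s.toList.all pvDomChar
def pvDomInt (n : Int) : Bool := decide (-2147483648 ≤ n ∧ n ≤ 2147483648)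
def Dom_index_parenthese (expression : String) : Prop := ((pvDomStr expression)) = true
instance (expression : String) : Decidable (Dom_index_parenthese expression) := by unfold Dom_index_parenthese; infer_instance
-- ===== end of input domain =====

-- B replaces A's forward-then-backward two-pass scan with a single forward pass that
-- remembers the most recent '(' index and stops at the first ')' (objective: simpler).

-- ===== PORT A =====
-- first loop of A: scan forward with index i, break at the first ')' (b stays 0 if none)
def pvFindClose (cs : List Char) (i : Int) : Int :=
  match cs with
  | [] => 0
  | c :: rest => if c = ')' then i else pvFindClose rest (i + 1)

-- second loop of A: for i in range(b, 0, -1), break at the first '(' (a stays 0 if none)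
def pvFindOpen (cs : List Char) (i : Int) : Int :=
  if h : i ≤ 0 then 0
  else if PySem.List.pyGet? cs i = some '(' then i
  else pvFindOpen cs (i - 1)
termination_by i.toNat
decreasing_by omega

def index_parenthese (expression : String) : Int × Int :=
  let b := pvFindClose expression.toList 0
  let a := pvFindOpen expression.toList b
  (a, b + 1)

-- ===== PORT B =====
-- single forward pass: on the first ')' return (last_open, i+1); record last_open on '('
def pvScan (cs : List Char) (i last : Int) : Int × Int :=
  match cs with
  | [] => (0, 1)
  | c :: rest =>
    if c = ')' then (last, i + 1)
    else if c = '(' then pvScan rest (i + 1) i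
    else pvScan rest (i + 1) last

def index_parenthese_alt (expression : String) : Int × Int :=
  pvScan expression.toList 0 0

-- ===== PRECONDITION & SPEC =====
def Spec_index_parenthese (expression : String) (out : Int × Int) : Prop := out = index_parenthese_alt expression
instance (expression : String) (out : Int × Int) : Decidable (Spec_index_parenthese expression out) := by unfold Spec_index_parenthese; infer_instance

-- ===== CLAIM (what is proved, stated in full; the proofs are below) =====
def Claim_equal_index_parenthese : Prop := ∀ (expression : String), Dom_index_parenthese expression → Spec_index_parenthese expression (index_parenthese expression)

-- ===== LEMMAS AND PROOFS =====

-- index of the first ')' in cs, if any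
def pvFc? (cs : List Char) : Option Nat :=
  match cs with
  | [] => none
  | c :: rest => if c = ')' then some 0 else (pvFc? rest).map (· + 1)

-- forward accumulator: last index (offset by i) of '(' in cs, else the incoming last
def pvLo (cs : List Char) (i last : Int) : Int :=
  match cs with
  | [] => last
  | c :: rest => pvLo rest (i + 1) (if c = '(' then i else last)

-- descending search for '(' over Nat indices (spec of pvFindOpen)
def pvG (cs : List Char) : Nat → Int
  | 0 => 0
  | m + 1 => if cs[m+1]? = some '(' then ((m : Int) + 1) else pvG cs m

theorem pvFindClose_eq (cs : List Char) (i : Int) :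
    pvFindClose cs i = match pvFc? cs with | some k => i + k | none => 0 := by
  induction cs generalizing i with
  | nil => rfl
  | cons c rest ih =>
    simp only [pvFindClose, pvFc?]
    split_ifs with h
    · simp
    · rw [ih]
      cases hk : pvFc? rest <;> simp [hk] <;> push_cast <;> ring

theorem pvFc?_get (cs : List Char) (k : Nat) (h : pvFc? cs = some k) :
    cs[k]? = some ')' := by
  induction cs generalizing k with
  | nil => simp [pvFc?] at h
  | cons c rest ih =>
    simp only [pvFc?] at h
    split_ifs at h with hc
    · cases h; simp [hc]
    · cases hk : pvFc? rest with
      | none => simp [hk] at h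
      | some m =>
        simp [hk] at h
        subst h
        simpa using ih m hk

theorem pvScan_eq (cs : List Char) (i last : Int) :
    pvScan cs i last = match pvFc? cs with
      | none => (0, 1)
      | some k => (pvLo (cs.take k) i last, i + k + 1) := by
  induction cs generalizing i last with
  | nil => rfl
  | cons c rest ih =>
    simp only [pvScan, pvFc?]
    split_ifs with h1 h2
    · simp [pvLo]
    · rw [ih]
      cases hk : pvFc? rest <;> simp [pvLo, h2] <;> omega
    · rw [ih]
      cases hk : pvFc? rest <;> simp [pvLo, h1, h2] <;> omega

theorem pvFindOpen_eq_g (cs : List Char) (m : Nat) :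
    pvFindOpen cs (m : Int) = pvG cs m := by
  induction m with
  | zero => simp [pvFindOpen, pvG]
  | succ n ih =>
    rw [pvFindOpen]
    have h0 : ¬ (((n + 1 : Nat) : Int) ≤ 0) := by push_cast; omega
    rw [dif_neg h0, PySem.List.pyGet?_natCast, pvG]
    split_ifs with hg
    · push_cast; ring
    · have hc : ((n + 1 : Nat) : Int) - 1 = (n : Int) := by push_cast; ring
      rw [hc, ih]

theorem pvG_take (cs : List Char) (m k : Nat) (h : m < k) :
    pvG (cs.take k) m = pvG cs m := by
  induction m with
  | zero => rfl
  | succ n ih =>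
    simp only [pvG, List.getElem?_take, if_pos (by omega : n + 1 < k)]
    rw [ih (by omega)]

theorem pvLo_append (ds : List Char) (c : Char) (i last : Int) :
    pvLo (ds ++ [c]) i last = if c = '(' then i + ds.length else pvLo ds i last := by
  induction ds generalizing i last with
  | nil => simp [pvLo]
  | cons d rest ih =>
    simp only [List.cons_append, pvLo, ih]
    split_ifs <;> simp [List.length_cons] <;> omega

theorem pvLo_eq_g (ds : List Char) : pvLo ds 0 0 = pvG ds (ds.length - 1) := by
  induction ds using List.reverseRecOn with
  | nil => rfl
  | append_singleton rest c ih =>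
    rw [pvLo_append]
    cases rest with
    | nil =>
      simp only [List.nil_append, List.length_cons, List.length_nil]
      split_ifs <;> simp [pvG, pvLo]
    | cons d tail =>
      have hlen : ((d :: tail) ++ [c]).length - 1 = (d :: tail).length := by simp
      obtain ⟨m, hm⟩ : ∃ m, (d :: tail).length = m + 1 := ⟨tail.length, by simp⟩
      have hget : ((d :: tail) ++ [c])[m + 1]? = some c := by
        rw [← hm, List.getElem?_append_right (le_refl (d :: tail).length)]
        simp
      by_cases hc : c = '('
      · rw [if_pos hc, hlen, hm, pvG, hget, if_pos (by rw [hc])]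
        push_cast; ring
      · rw [if_neg hc, hlen, hm, pvG, hget, if_neg (by simp [hc])]
        rw [ih, hm]
        have h2 : pvG ((d :: tail) ++ [c]) m = pvG (d :: tail) m := by
          have h3 := pvG_take ((d :: tail) ++ [c]) m (m + 1) (by omega)
          rw [show ((d :: tail) ++ [c]).take (m + 1) = d :: tail by
            rw [← hm]; simp] at h3
          exact h3.symm
        exact h2.symm

-- ===== VERDICT (by name: the statement is the Claim_ definition above) =====
theorem index_parenthese_spec : Claim_equal_index_parenthese := by
  intro expression _
  unfold Spec_index_parenthese index_parenthese index_parenthese_alt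
  set cs := expression.toList with hcs
  rw [pvScan_eq, pvFindClose_eq]
  cases hk : pvFc? cs with
  | none =>
    simp only
    rw [show pvFindOpen cs 0 = 0 by rw [pvFindOpen]; simp]
    norm_num
  | some k =>
    simp only [zero_add]
    have hget := pvFc?_get cs k hk
    obtain ⟨hlt, -⟩ := List.getElem?_eq_some_iff.mp hget
    rw [pvFindOpen_eq_g cs k]
    congr 1
    · cases k with
      | zero => simp [pvG, pvLo]
      | succ m =>
        rw [pvG, if_neg (by rw [hget]; simp)]
        rw [pvLo_eq_g]
        have hlen : (cs.take (m + 1)).length - 1 = m := by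
          simp [List.length_take]; omega
        rw [hlen]
        exact (pvG_take cs m (m + 1) (by omega)).symm
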